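-- pv_equiv track=rewrite | github.com/peterdactylus/hacking-legal | mcp_server/legal_kb.py | get_investigation_checklist
-- ===== SOURCE A (Python) =====
-- def get_investigation_checklist(country_iso: str, case_classification: str) -> list[str]:
--     """Return required procedural steps for a case in a given jurisdiction.
--
--     Args:
--         country_iso: ISO 3166-1 alpha-2 country code.
--         case_classification: Case type string from EQS (e.g. "fraud", "harassment").
--
--     Returns:
--         Ordered list of procedural step strings.
--     """
--     country = country_iso.upper()
--
--     # Base steps applicable everywhere (EU Directive + GDPR)
--     steps = [
--         "Acknowledge receipt of report within 7 days (EU Whistleblowing Directive 2019/1937)",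
--         "Assign a designated investigator and document the assignment",
--         "Assess whether the report falls within scope of the applicable whistleblower protection law",
--         "Determine the lawful basis for processing personal data (GDPR Art. 6) and document it",
--         "Conduct a proportionality assessment before accessing any employee personal data",
--         "Preserve confidentiality of the reporter's identity throughout the investigation",
--     ]
--
--     # Country-specific additions
--     if country == "DE":
--         steps += [
--             "Check whether works council (Betriebsrat) notification is required before accessing employee data (BetrVG §87)",
--             "Verify all-party consent before recording any interview (StGB §201) — use written notes instead",
--             "Determine whether private email use is permitted by policy before reviewing mailbox (BDSG §26 / TKG §88)",
--             "If suspension is planned, ensure it is with pay and document the factual basis (BGB §626)",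
--             "Notify works council before any dismissal and allow 1-week hearing period (BetrVG §102)",
--             "Provide feedback to the reporter within 3 months (HinSchG)",
--         ]
--     elif country == "FR":
--         steps += [
--             "Consult CSE (Comité Social et Économique) before implementing any monitoring measures",
--             "Verify all-party consent before recording any interview (Code pénal Art. 226-1)",
--             "Check CNIL guidelines before accessing employee email — especially if private use is permitted",
--             "Follow Code du travail disciplinary procedure (convocation at least 5 working days before meeting)",
--             "Provide feedback to the reporter within 3 months (Loi 2022-401)",
--         ]
--     elif country == "GB":
--         steps += [
--             "Inform the employee of the right to be accompanied at any disciplinary or investigatory meeting (ERA 1999 s.10)",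
--             "Follow ACAS Code of Practice on Disciplinary and Grievance Procedures",
--             "Conduct a Data Protection Impact Assessment (DPIA) if systematic email monitoring is planned",
--             "Review DPA 2018 Sch. 2 Para. 29 if withholding information from a subject access request during active investigation",
--             "Ensure any suspension is on full pay unless contract expressly provides otherwise",
--             "Provide feedback to the reporter within 3 months (PIDA 1998 / ERA 1996 s.43A)",
--         ]
--
--     # Classification-specific additions
--     classification_lower = (case_classification or "").lower()
--     if any(k in classification_lower for k in ("fraud", "financial", "bribery", "corruption")):
--         steps.append(
--             "Consider whether mandatory reporting obligations to financial regulators apply "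
--             "(e.g. BaFin in DE, AMF in FR, FCA in GB)"
--         )
--     if any(k in classification_lower for k in ("harassment", "discrimination", "bullying")):
--         steps.append(
--             "Ensure the subject of the report and any witnesses are interviewed separately "
--             "and that anti-retaliation measures are in place for all parties"
--         )
--     if any(k in classification_lower for k in ("safety", "health", "environment")):
--         steps.append(
--             "Assess whether the matter requires immediate notification to a health & safety "
--             "or environmental regulator"
--         )
--
--     steps.append(
--         "Document all investigation steps contemporaneously with dates, persons involved, and findings"
--     )
--     steps.append(
--         "Set a defined retention period for case records before closing the case (GDPR Art. 5(1)(e))"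
--     )
--
--     return steps
-- ===== SOURCE B (Python) =====
-- # Uniform rule engine: every block (base, per-country, per-classification, final)
-- # is one (guard, block) rule over a normalized context; the checklist is produced
-- # by a single flattening pass over the rule list (no staged if/elif mutation).
--
-- def _always(ctx):
--     return True
--
-- def _country(code):
--     return lambda ctx: ctx[0] == code
--
-- def _mentions(*keywords):
--     return lambda ctx: any(k in ctx[1] for k in keywords)
--
-- _RULES = [
--     (_always, [
--         "Acknowledge receipt of report within 7 days (EU Whistleblowing Directive 2019/1937)",
--         "Assign a designated investigator and document the assignment",
--         "Assess whether the report falls within scope of the applicable whistleblower protection law",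
--         "Determine the lawful basis for processing personal data (GDPR Art. 6) and document it",
--         "Conduct a proportionality assessment before accessing any employee personal data",
--         "Preserve confidentiality of the reporter's identity throughout the investigation",
--     ]),
--     (_country("DE"), [
--         "Check whether works council (Betriebsrat) notification is required before accessing employee data (BetrVG §87)",
--         "Verify all-party consent before recording any interview (StGB §201) — use written notes instead",
--         "Determine whether private email use is permitted by policy before reviewing mailbox (BDSG §26 / TKG §88)",
--         "If suspension is planned, ensure it is with pay and document the factual basis (BGB §626)",
--         "Notify works council before any dismissal and allow 1-week hearing period (BetrVG §102)",
--         "Provide feedback to the reporter within 3 months (HinSchG)",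
--     ]),
--     (_country("FR"), [
--         "Consult CSE (Comité Social et Économique) before implementing any monitoring measures",
--         "Verify all-party consent before recording any interview (Code pénal Art. 226-1)",
--         "Check CNIL guidelines before accessing employee email — especially if private use is permitted",
--         "Follow Code du travail disciplinary procedure (convocation at least 5 working days before meeting)",
--         "Provide feedback to the reporter within 3 months (Loi 2022-401)",
--     ]),
--     (_country("GB"), [
--         "Inform the employee of the right to be accompanied at any disciplinary or investigatory meeting (ERA 1999 s.10)",
--         "Follow ACAS Code of Practice on Disciplinary and Grievance Procedures",
--         "Conduct a Data Protection Impact Assessment (DPIA) if systematic email monitoring is planned",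
--         "Review DPA 2018 Sch. 2 Para. 29 if withholding information from a subject access request during active investigation",
--         "Ensure any suspension is on full pay unless contract expressly provides otherwise",
--         "Provide feedback to the reporter within 3 months (PIDA 1998 / ERA 1996 s.43A)",
--     ]),
--     (_mentions("fraud", "financial", "bribery", "corruption"), [
--         "Consider whether mandatory reporting obligations to financial regulators apply "
--         "(e.g. BaFin in DE, AMF in FR, FCA in GB)",
--     ]),
--     (_mentions("harassment", "discrimination", "bullying"), [
--         "Ensure the subject of the report and any witnesses are interviewed separately "
--         "and that anti-retaliation measures are in place for all parties",
--     ]),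
--     (_mentions("safety", "health", "environment"), [
--         "Assess whether the matter requires immediate notification to a health & safety "
--         "or environmental regulator",
--     ]),
--     (_always, [
--         "Document all investigation steps contemporaneously with dates, persons involved, and findings",
--         "Set a defined retention period for case records before closing the case (GDPR Art. 5(1)(e))",
--     ]),
-- ]
--
--
-- def get_investigation_checklist(country_iso: str, case_classification: str) -> list[str]:
--     ctx = (country_iso.upper(), (case_classification or "").lower())
--     return [step for guard, block in _RULES if guard(ctx) for step in block]
-- ===== Notes on version B (the rewrite author's own statement) =====
-- stated objective: idiomatic
-- what changed: A's staged if/elif country chain and three separate classification ifs mutating a steps list are replaced by a uniform rule engine: a single list of (guard, block) rules over a normalized (country, lowered-classification) context, flattened in one comprehension pass.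
import Mathlib
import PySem

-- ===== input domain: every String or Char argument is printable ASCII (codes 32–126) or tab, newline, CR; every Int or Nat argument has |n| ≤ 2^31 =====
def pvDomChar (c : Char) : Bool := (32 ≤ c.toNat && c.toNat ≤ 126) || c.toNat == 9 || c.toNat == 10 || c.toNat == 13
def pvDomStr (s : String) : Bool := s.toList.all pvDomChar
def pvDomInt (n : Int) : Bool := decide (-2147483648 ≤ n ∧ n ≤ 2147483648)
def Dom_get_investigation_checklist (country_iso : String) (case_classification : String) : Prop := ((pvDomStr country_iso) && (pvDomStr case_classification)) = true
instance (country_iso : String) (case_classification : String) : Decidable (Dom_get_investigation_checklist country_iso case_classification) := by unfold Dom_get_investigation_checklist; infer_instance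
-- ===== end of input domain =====

-- B replaces A's staged if/elif mutation of a steps list by a uniform rule engine:
-- one (guard, block) rule list over a normalized (country, lowered) context,
-- flattened in a single pass (idiomatic, same cost).


-- ===== PORT A =====
def get_investigation_checklist (country_iso : String) (case_classification : String) : List String :=
  let country := PySem.Str.upper country_iso
  let steps : List String := [
    "Acknowledge receipt of report within 7 days (EU Whistleblowing Directive 2019/1937)",
    "Assign a designated investigator and document the assignment",
    "Assess whether the report falls within scope of the applicable whistleblower protection law",
    "Determine the lawful basis for processing personal data (GDPR Art. 6) and document it",
    "Conduct a proportionality assessment before accessing any employee personal data",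
    "Preserve confidentiality of the reporter's identity throughout the investigation"]
  let steps :=
    if country == "DE" then steps ++ [
      "Check whether works council (Betriebsrat) notification is required before accessing employee data (BetrVG §87)",
      "Verify all-party consent before recording any interview (StGB §201) — use written notes instead",
      "Determine whether private email use is permitted by policy before reviewing mailbox (BDSG §26 / TKG §88)",
      "If suspension is planned, ensure it is with pay and document the factual basis (BGB §626)",
      "Notify works council before any dismissal and allow 1-week hearing period (BetrVG §102)",
      "Provide feedback to the reporter within 3 months (HinSchG)"]
    else if country == "FR" then steps ++ [
      "Consult CSE (Comité Social et Économique) before implementing any monitoring measures",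
      "Verify all-party consent before recording any interview (Code pénal Art. 226-1)",
      "Check CNIL guidelines before accessing employee email — especially if private use is permitted",
      "Follow Code du travail disciplinary procedure (convocation at least 5 working days before meeting)",
      "Provide feedback to the reporter within 3 months (Loi 2022-401)"]
    else if country == "GB" then steps ++ [
      "Inform the employee of the right to be accompanied at any disciplinary or investigatory meeting (ERA 1999 s.10)",
      "Follow ACAS Code of Practice on Disciplinary and Grievance Procedures",
      "Conduct a Data Protection Impact Assessment (DPIA) if systematic email monitoring is planned",
      "Review DPA 2018 Sch. 2 Para. 29 if withholding information from a subject access request during active investigation",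
      "Ensure any suspension is on full pay unless contract expressly provides otherwise",
      "Provide feedback to the reporter within 3 months (PIDA 1998 / ERA 1996 s.43A)"]
    else steps
  -- `(case_classification or "")`: for a str this is "" when empty, the string itself otherwise
  let classification_lower := PySem.Str.lower (if case_classification == "" then "" else case_classification)
  let steps :=
    if (["fraud", "financial", "bribery", "corruption"].any fun k => PySem.Str.isIn k classification_lower) then
      steps ++ ["Consider whether mandatory reporting obligations to financial regulators apply (e.g. BaFin in DE, AMF in FR, FCA in GB)"]
    else steps
  let steps :=
    if (["harassment", "discrimination", "bullying"].any fun k => PySem.Str.isIn k classification_lower) then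
      steps ++ ["Ensure the subject of the report and any witnesses are interviewed separately and that anti-retaliation measures are in place for all parties"]
    else steps
  let steps :=
    if (["safety", "health", "environment"].any fun k => PySem.Str.isIn k classification_lower) then
      steps ++ ["Assess whether the matter requires immediate notification to a health & safety or environmental regulator"]
    else steps
  let steps := steps ++ ["Document all investigation steps contemporaneously with dates, persons involved, and findings"]
  let steps := steps ++ ["Set a defined retention period for case records before closing the case (GDPR Art. 5(1)(e))"]
  steps

-- ===== PORT B =====
-- guards over the normalized context (country, lowered classification)
def pvAlways : String × String → Bool := fun _ => true
def pvCountry (code : String) : String × String → Bool := fun ctx => ctx.1 == code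
def pvMentions (keywords : List String) : String × String → Bool :=
  fun ctx => keywords.any fun k => PySem.Str.isIn k ctx.2

def pvRules : List ((String × String → Bool) × List String) := [
  (pvAlways, [
    "Acknowledge receipt of report within 7 days (EU Whistleblowing Directive 2019/1937)",
    "Assign a designated investigator and document the assignment",
    "Assess whether the report falls within scope of the applicable whistleblower protection law",
    "Determine the lawful basis for processing personal data (GDPR Art. 6) and document it",
    "Conduct a proportionality assessment before accessing any employee personal data",
    "Preserve confidentiality of the reporter's identity throughout the investigation"]),
  (pvCountry "DE", [
    "Check whether works council (Betriebsrat) notification is required before accessing employee data (BetrVG §87)",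
    "Verify all-party consent before recording any interview (StGB §201) — use written notes instead",
    "Determine whether private email use is permitted by policy before reviewing mailbox (BDSG §26 / TKG §88)",
    "If suspension is planned, ensure it is with pay and document the factual basis (BGB §626)",
    "Notify works council before any dismissal and allow 1-week hearing period (BetrVG §102)",
    "Provide feedback to the reporter within 3 months (HinSchG)"]),
  (pvCountry "FR", [
    "Consult CSE (Comité Social et Économique) before implementing any monitoring measures",
    "Verify all-party consent before recording any interview (Code pénal Art. 226-1)",
    "Check CNIL guidelines before accessing employee email — especially if private use is permitted",
    "Follow Code du travail disciplinary procedure (convocation at least 5 working days before meeting)",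
    "Provide feedback to the reporter within 3 months (Loi 2022-401)"]),
  (pvCountry "GB", [
    "Inform the employee of the right to be accompanied at any disciplinary or investigatory meeting (ERA 1999 s.10)",
    "Follow ACAS Code of Practice on Disciplinary and Grievance Procedures",
    "Conduct a Data Protection Impact Assessment (DPIA) if systematic email monitoring is planned",
    "Review DPA 2018 Sch. 2 Para. 29 if withholding information from a subject access request during active investigation",
    "Ensure any suspension is on full pay unless contract expressly provides otherwise",
    "Provide feedback to the reporter within 3 months (PIDA 1998 / ERA 1996 s.43A)"]),
  (pvMentions ["fraud", "financial", "bribery", "corruption"], [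
    "Consider whether mandatory reporting obligations to financial regulators apply (e.g. BaFin in DE, AMF in FR, FCA in GB)"]),
  (pvMentions ["harassment", "discrimination", "bullying"], [
    "Ensure the subject of the report and any witnesses are interviewed separately and that anti-retaliation measures are in place for all parties"]),
  (pvMentions ["safety", "health", "environment"], [
    "Assess whether the matter requires immediate notification to a health & safety or environmental regulator"]),
  (pvAlways, [
    "Document all investigation steps contemporaneously with dates, persons involved, and findings",
    "Set a defined retention period for case records before closing the case (GDPR Art. 5(1)(e))"])]

def get_investigation_checklist_alt (country_iso : String) (case_classification : String) : List String :=
  -- `(case_classification or "")`: for a str this is "" when empty, the string itself otherwise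
  let ctx := (PySem.Str.upper country_iso,
              PySem.Str.lower (if case_classification == "" then "" else case_classification))
  pvRules.flatMap fun r => if r.1 ctx then r.2 else []

-- ===== PRECONDITION & SPEC =====
def Spec_get_investigation_checklist (country_iso : String) (case_classification : String) (out : List String) : Prop := out = get_investigation_checklist_alt country_iso case_classification
instance (country_iso : String) (case_classification : String) (out : List String) : Decidable (Spec_get_investigation_checklist country_iso case_classification out) := by unfold Spec_get_investigation_checklist; infer_instance

-- ===== CLAIM (what is proved, stated in full; the proofs are below) =====
def Claim_equal_get_investigation_checklist : Prop := ∀ (country_iso : String) (case_classification : String), Dom_get_investigation_checklist country_iso case_classification → Spec_get_investigation_checklist country_iso case_classification (get_investigation_checklist country_iso case_classification)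

-- ===== LEMMAS AND PROOFS =====

-- ===== VERDICT (by name: the statement is the Claim_ definition above) =====
set_option maxHeartbeats 1000000 in
theorem get_investigation_checklist_spec : Claim_equal_get_investigation_checklist := by
  intro country_iso case_classification _
  unfold Spec_get_investigation_checklist get_investigation_checklist get_investigation_checklist_alt
  simp only [pvRules, pvAlways, pvCountry, pvMentions, List.flatMap_cons, List.flatMap_nil,
    if_true]
  split_ifs <;> simp_all
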